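-- pv_equiv track=rewrite | github.com/BKaanS/Diyabet-tahmini-PIMA | uygulama/servisler/risk_servisi.py | risk_kategorisini_normalize_et
-- ===== SOURCE A (Python) =====
-- RISK_KATEGORISI_ESLEMESI = {
--     "dusuk": "dusuk",
--     "low": "dusuk",
--     "cok_dusuk": "dusuk",
--     "cokdusuk": "dusuk",
--     "very_low": "dusuk",
--     "orta": "orta",
--     "medium": "orta",
--     "mid": "orta",
--     "orta_risk": "orta",
--     "yuksek": "yuksek",
--     "high": "yuksek",
--     "cok_yuksek": "yuksek",
--     "cokyuksek": "yuksek",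
--     "very_high": "yuksek",
-- }
--
-- _TR_HARF_CEVIRIMI = str.maketrans("çğıöşü", "cgiosu")
--
-- def risk_kategorisini_normalize_et(risk_kategorisi: str) -> str:
--     """Legacy veya farkli formatlardan gelen risk etiketini 3'lu standarda cevirir."""
--     sade = str(risk_kategorisi).strip().lower()
--     sade = sade.translate(_TR_HARF_CEVIRIMI)
--     sade = sade.replace("-", "_").replace(" ", "_")
--     while "__" in sade:
--         sade = sade.replace("__", "_")
--
--     if sade in RISK_KATEGORISI_ESLEMESI:
--         return RISK_KATEGORISI_ESLEMESI[sade]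
--
--     if "dusuk" in sade or "low" in sade:
--         return "dusuk"
--     if "yuksek" in sade or "high" in sade:
--         return "yuksek"
--     if "orta" in sade or "medium" in sade or "mid" in sade:
--         return "orta"
--
--     raise ValueError(
--         "risk_kategorisi desteklenmeyen degerde geldi: "
--         f"{risk_kategorisi!r}. Beklenen degerler: dusuk, orta, yuksek."
--     )
-- ===== SOURCE B (Python) =====
-- _TR_HARF_CEVIRIMI = str.maketrans("çğıöşü", "cgiosu")
--
-- def risk_kategorisini_normalize_et(risk_kategorisi: str) -> str:
--     """Tek geciste normalize eder, tablo yerine ipucu-alt-dizgisi taramasiyla karar verir."""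
--     metin = str(risk_kategorisi).strip().lower().translate(_TR_HARF_CEVIRIMI)
--     parcalar = []
--     for c in metin:
--         if c in "- ":
--             c = "_"
--         if c == "_" and parcalar and parcalar[-1] == "_":
--             continue
--         parcalar.append(c)
--     sade = "".join(parcalar)
--     for etiket, ipuclari in (("dusuk", ("dusuk", "low")),
--                              ("yuksek", ("yuksek", "high")),
--                              ("orta", ("orta", "medium", "mid"))):
--         if any(ipucu in sade for ipucu in ipuclari):
--             return etiket
--     raise ValueError(
--         "risk_kategorisi desteklenmeyen degerde geldi: "
--         f"{risk_kategorisi!r}. Beklenen degerler: dusuk, orta, yuksek."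
--     )
-- ===== Notes on version B (the rewrite author's own statement) =====
-- stated objective: simpler
-- what changed: B replaces A's multi-pass normalization (two replace passes plus a repeat-until-fixpoint '__'-collapsing loop) with one single-pass accumulator loop over the characters, and drops the 14-entry exact-match dict entirely, deciding the label by a data-driven substring scan in the same priority order (every dict key is subsumed by the substring rules).
import Mathlib
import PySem

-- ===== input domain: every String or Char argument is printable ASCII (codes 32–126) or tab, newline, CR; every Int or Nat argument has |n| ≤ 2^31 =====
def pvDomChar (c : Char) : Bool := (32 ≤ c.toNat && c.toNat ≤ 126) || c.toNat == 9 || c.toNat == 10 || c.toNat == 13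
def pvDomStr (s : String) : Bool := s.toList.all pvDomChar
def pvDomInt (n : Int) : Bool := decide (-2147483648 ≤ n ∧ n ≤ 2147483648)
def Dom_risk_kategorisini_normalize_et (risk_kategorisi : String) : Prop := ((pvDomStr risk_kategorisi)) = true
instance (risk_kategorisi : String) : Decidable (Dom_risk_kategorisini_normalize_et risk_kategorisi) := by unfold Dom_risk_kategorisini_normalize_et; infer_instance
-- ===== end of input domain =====

-- B normalizes in ONE accumulator pass (map Turkish letters, '-'/' '→'_', skip a '_' after a '_')
-- instead of A's pipeline of replace passes plus a repeat-until-fixpoint "__"-collapsing loop,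
-- and drops the 14-entry exact-match dict: the label is decided by the substring scan alone.

-- ===== PORT A =====

-- str.translate with the 1-char→1-char table {ç→c, ğ→g, ı→i, ö→o, ş→s, ü→u}: exact per-character map
def pvTrChar (c : Char) : Char :=
  if c = 'ç' then 'c' else if c = 'ğ' then 'g' else if c = 'ı' then 'i'
  else if c = 'ö' then 'o' else if c = 'ş' then 's' else if c = 'ü' then 'u' else c

def RISK_KATEGORISI_ESLEMESI : PySem.Dict String String := PySem.Dict.ofList
  [("dusuk", "dusuk"), ("low", "dusuk"), ("cok_dusuk", "dusuk"), ("cokdusuk", "dusuk"),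
   ("very_low", "dusuk"), ("orta", "orta"), ("medium", "orta"), ("mid", "orta"),
   ("orta_risk", "orta"), ("yuksek", "yuksek"), ("high", "yuksek"), ("cok_yuksek", "yuksek"),
   ("cokyuksek", "yuksek"), ("very_high", "yuksek")]

-- while "__" in sade: sade = sade.replace("__", "_")  — fuel = current length (each pass shortens the string)
def pvCollapseA (fuel : Nat) (sade : String) : String :=
  match fuel with
  | 0 => sade
  | fuel + 1 =>
      if PySem.Str.isIn "__" sade then pvCollapseA fuel (PySem.Str.replace sade "__" "_") else sade

def risk_kategorisini_normalize_et (risk_kategorisi : String) : String :=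
  let sade := PySem.Str.lower (PySem.Str.strip risk_kategorisi)
  let sade := String.ofList (sade.toList.map pvTrChar)
  let sade := PySem.Str.replace (PySem.Str.replace sade "-" "_") " " "_"
  let sade := pvCollapseA sade.toList.length sade
  match RISK_KATEGORISI_ESLEMESI.get? sade with   -- if sade in DICT: return DICT[sade]
  | some v => v
  | none =>
    if PySem.Str.isIn "dusuk" sade || PySem.Str.isIn "low" sade then "dusuk"
    else if PySem.Str.isIn "yuksek" sade || PySem.Str.isIn "high" sade then "yuksek"
    else if PySem.Str.isIn "orta" sade || PySem.Str.isIn "medium" sade || PySem.Str.isIn "mid" sade then "orta"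
    else ""   -- raise ValueError: excluded by Pre_

-- ===== PORT B =====

-- loop body: c = "_" if c in "- "; skip when c == "_" and parcalar and parcalar[-1] == "_"
def pvStepB (parcalar : List Char) (c : Char) : List Char :=
  let c := if c = '-' ∨ c = ' ' then '_' else c
  if c = '_' ∧ parcalar.getLast? = some '_' then parcalar else parcalar ++ [c]

def pvTabloB : List (String × List String) :=
  [("dusuk", ["dusuk", "low"]), ("yuksek", ["yuksek", "high"]), ("orta", ["orta", "medium", "mid"])]

def pvSecB (sade : String) : List (String × List String) → Option String
  | [] => none
  | (etiket, ipuclari) :: rest =>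
      if ipuclari.any (fun ipucu => PySem.Str.isIn ipucu sade) then some etiket else pvSecB sade rest

def risk_kategorisini_normalize_et_alt (risk_kategorisi : String) : String :=
  let metin := String.ofList ((PySem.Str.lower (PySem.Str.strip risk_kategorisi)).toList.map pvTrChar)
  let sade := String.ofList (metin.toList.foldl pvStepB [])
  match pvSecB sade pvTabloB with
  | some etiket => etiket
  | none => ""   -- raise ValueError: excluded by Pre_

-- ===== PRECONDITION & SPEC =====
-- Pre_ excludes exactly the inputs on which A raises ValueError: those whose stripped,
-- lowercased and Turkish-transliterated text contains none of the seven risk keywords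
-- (underscore normalization cannot create or destroy a keyword, which is all letters).
def Pre_risk_kategorisini_normalize_et (risk_kategorisi : String) : Prop :=
  ∃ kw ∈ (["dusuk", "low", "yuksek", "high", "orta", "medium", "mid"] : List String),
    PySem.Str.isIn kw
      (String.ofList ((PySem.Str.lower (PySem.Str.strip risk_kategorisi)).toList.map pvTrChar)) = true
instance (risk_kategorisi : String) : Decidable (Pre_risk_kategorisini_normalize_et risk_kategorisi) := by
  unfold Pre_risk_kategorisini_normalize_et; infer_instance

def pvWitness_risk_kategorisini_normalize_et : String := "Cok - Yuksek"

def Spec_risk_kategorisini_normalize_et (risk_kategorisi : String) (out : String) : Prop := out = risk_kategorisini_normalize_et_alt risk_kategorisi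
instance (risk_kategorisi : String) (out : String) : Decidable (Spec_risk_kategorisini_normalize_et risk_kategorisi out) := by unfold Spec_risk_kategorisini_normalize_et; infer_instance

-- ===== CLAIM (what is proved, stated in full; the proofs are below) =====
def Claim_equal_risk_kategorisini_normalize_et : Prop := ∀ (risk_kategorisi : String), Dom_risk_kategorisini_normalize_et risk_kategorisi → Pre_risk_kategorisini_normalize_et risk_kategorisi → Spec_risk_kategorisini_normalize_et risk_kategorisi (risk_kategorisini_normalize_et risk_kategorisi)

-- ===== LEMMAS AND PROOFS =====

-- One full pass of str.replace("__", "_") (left-to-right, non-overlapping)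
def pvRepl : List Char → List Char
  | [] => []
  | [c] => [c]
  | c1 :: c2 :: r =>
      if c1 = '_' ∧ c2 = '_' then '_' :: pvRepl r else c1 :: pvRepl (c2 :: r)

-- the fixpoint both pipelines reach: '_'-runs squeezed; flag = "last emitted char was '_'"
def pvSq (b : Bool) : List Char → List Char
  | [] => []
  | c :: r =>
      if c = '_' then (if b then pvSq b r else '_' :: pvSq true r) else c :: pvSq false r

theorem goSingle (a b : Char) (l : List Char) : ∀ (fuel : Nat) (acc : List Char), l.length ≤ fuel →
    PySem.Chars.replace.go [a] [b] fuel l acc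
      = acc.reverse ++ l.map (fun c => if c = a then b else c) := by
  induction l with
  | nil => intro fuel acc h; cases fuel <;> simp [PySem.Chars.replace.go]
  | cons c t ih =>
      intro fuel acc h
      cases fuel with
      | zero => simp at h
      | succ fuel =>
        rw [PySem.Chars.replace.go]
        by_cases hc : c = a
        · subst hc
          simp only [List.isPrefixOf, Bool.and_true, beq_self_eq_true, if_pos, List.length_cons,
            List.length_nil, List.drop_succ_cons, List.drop_zero]
          rw [ih fuel _ (by simpa using h)]
          simp
        · have hp : ([a].isPrefixOf (c :: t)) = false := by
            simp [List.isPrefixOf]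
            exact fun hh => hc hh.symm
          rw [hp]
          simp only [Bool.false_eq_true, if_false]
          rw [ih fuel _ (by simpa using h)]
          simp [hc]

theorem pvReplace_single (a b : Char) (l : List Char) :
    PySem.Chars.replace l [a] [b] = l.map (fun c => if c = a then b else c) := by
  rw [PySem.Chars.replace]
  simp [goSingle a b l l.length [] le_rfl]

theorem goUU : ∀ (fuel : Nat) (l acc : List Char), l.length ≤ fuel →
    PySem.Chars.replace.go ['_', '_'] ['_'] fuel l acc = acc.reverse ++ pvRepl l := by
  intro fuel
  induction fuel with
  | zero => intro l acc h; interval_cases hl : l.length; · simp_all [PySem.Chars.replace.go, List.length_eq_zero_iff.mp hl, pvRepl]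
  | succ fuel ih =>
      intro l acc h
      match l with
      | [] => simp [PySem.Chars.replace.go, pvRepl]
      | [c] =>
          rw [PySem.Chars.replace.go]
          have hp : (['_', '_'].isPrefixOf [c]) = false := by simp [List.isPrefixOf]
          rw [hp]
          simp only [Bool.false_eq_true, if_false]
          rw [ih [] (c :: acc) (by simp)]
          simp [pvRepl]
      | c1 :: c2 :: r =>
          rw [PySem.Chars.replace.go]
          by_cases huu : c1 = '_' ∧ c2 = '_'
          · obtain ⟨h1, h2⟩ := huu; subst h1; subst h2
            simp only [List.isPrefixOf, beq_self_eq_true, Bool.and_true, if_pos,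
              List.length_cons, List.drop_succ_cons, List.drop_zero, List.length_nil]
            rw [show (['_'] : List Char).reverse ++ acc = '_' :: acc from rfl, ih r ('_' :: acc) (by simp at h ⊢; omega)]
            simp [pvRepl]
          · have hp : (['_', '_'].isPrefixOf (c1 :: c2 :: r)) = false := by
              simp [List.isPrefixOf]
              intro h1 h2; exact huu ⟨h1.symm, h2.symm⟩
            rw [hp]
            simp only [Bool.false_eq_true, if_false]
            rw [ih (c2 :: r) (c1 :: acc) (by simp at h ⊢; omega)]
            simp [pvRepl, if_neg huu]

theorem pvReplace_uu (l : List Char) :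
    PySem.Chars.replace l ['_', '_'] ['_'] = pvRepl l := by
  rw [PySem.Chars.replace]
  simp [goUU l.length l [] le_rfl]

theorem pvSq_repl (l : List Char) : ∀ b, pvSq b (pvRepl l) = pvSq b l := by
  induction l using pvRepl.induct with
  | case1 => intro b; rfl
  | case2 c => intro b; rfl
  | case3 c1 c2 r h ih =>
      intro b
      obtain ⟨h1, h2⟩ := h; subst h1; subst h2
      show pvSq b ('_' :: pvRepl r) = _
      cases b <;> simp [pvSq, ih]
  | case4 c1 c2 r h ih =>
      intro b
      simp only [pvRepl, if_neg h]
      by_cases h1 : c1 = '_'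
      · subst h1
        have h2 : ¬ c2 = '_' := fun hh => h ⟨rfl, hh⟩
        cases b <;> simp [pvSq, ih, h2]
      · simp [pvSq, h1, ih]

theorem pvSq_id (l : List Char) (h : ¬ ['_', '_'] <:+: l) :
    ∀ b, (b = true → l.head? ≠ some '_') → pvSq b l = l := by
  induction l with
  | nil => intro b _; rfl
  | cons c r ih =>
      intro b hb
      have hr : ¬ ['_', '_'] <:+: r := fun hi => h (List.infix_cons hi)
      by_cases hc : c = '_'
      · subst hc
        have hbf : b = false := by
          cases b
          · rfl
          · exact (hb rfl rfl).elim
        subst hbf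
        have hhd : r.head? ≠ some '_' := by
          intro hh
          match r, hh with
          | d :: r', hh =>
              have : d = '_' := by simpa using hh
              subst this
              exact h ⟨[], r', rfl⟩
        simp only [pvSq, Bool.false_eq_true, if_false]
        rw [ih hr true (fun _ => hhd)]
        simp
      · simp only [pvSq, if_neg hc]
        rw [ih hr false (by simp)]

theorem pvRepl_length_le (l : List Char) : (pvRepl l).length ≤ l.length := by
  induction l using pvRepl.induct with
  | case1 => simp [pvRepl]
  | case2 c => simp [pvRepl]
  | case3 c1 c2 r h ih => obtain ⟨h1, h2⟩ := h; subst h1; subst h2; simp [pvRepl]; omega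
  | case4 c1 c2 r h ih => simp [pvRepl, if_neg h]; simpa using ih

theorem pvRepl_length_lt (l : List Char) (h : ['_', '_'] <:+: l) :
    (pvRepl l).length < l.length := by
  induction l using pvRepl.induct with
  | case1 => simp at h
  | case2 c =>
      exfalso
      rcases h with ⟨s, t, hst⟩
      apply_fun List.length at hst
      simp at hst
      omega
  | case3 c1 c2 r hc ih =>
      obtain ⟨h1, h2⟩ := hc; subst h1; subst h2
      have := pvRepl_length_le r
      simp [pvRepl]
      omega
  | case4 c1 c2 r hc ih =>
      have h' : ['_', '_'] <:+: (c2 :: r) := by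
        rcases (List.infix_cons_iff.mp h) with hp | hi
        · exfalso
          rcases hp with ⟨t, ht⟩
          simp at ht
          exact hc ⟨ht.1.symm, ht.2.1.symm⟩
        · exact hi
      simp only [pvRepl, if_neg hc, List.length_cons]
      have := ih h'
      simp only [List.length_cons] at this
      omega

theorem pvCollapseA_eq_sq (n : Nat) : ∀ (l : List Char), l.length ≤ n →
    (pvCollapseA n (String.ofList l)).toList = pvSq false l := by
  induction n with
  | zero =>
      intro l h
      have : l = [] := List.length_eq_zero_iff.mp (Nat.le_zero.mp h)
      subst this; rfl
  | succ n ih =>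
      intro l h
      rw [pvCollapseA]
      by_cases hin : PySem.Str.isIn "__" (String.ofList l) = true
      · rw [if_pos hin]
        have hinf : ['_', '_'] <:+: l := by
          rw [PySem.Str.isIn] at hin
          have := (PySem.Chars.isIn_iff_infix _ _).mp (by simpa using hin)
          simpa using this
        have hrepl : PySem.Str.replace (String.ofList l) "__" "_" = String.ofList (pvRepl l) := by
          rw [PySem.Str.replace]
          simp [pvReplace_uu]
        rw [hrepl, ih (pvRepl l) (by have := pvRepl_length_lt l hinf; omega)]
        exact pvSq_repl l false
      · rw [if_neg hin]
        have hinf : ¬ ['_', '_'] <:+: l := by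
          rw [PySem.Str.isIn] at hin
          intro hi
          exact hin (by simpa using (PySem.Chars.isIn_iff_infix (String.toList "__") l).mpr (by simpa using hi))
        simp [pvSq_id l hinf false (by simp)]

theorem pvFoldl_stepB (m : List Char) : ∀ (acc : List Char),
    m.foldl (fun p c => pvStepB p c) acc
      = acc ++ pvSq (decide (acc.getLast? = some '_')) (m.map (fun c => if c = '-' ∨ c = ' ' then '_' else c)) := by
  induction m with
  | nil => intro acc; simp [pvSq]
  | cons c r ih =>
      intro acc
      simp only [List.foldl_cons, List.map_cons]
      set c' := if c = '-' ∨ c = ' ' then '_' else c with hc'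
      by_cases hu : c' = '_'
      · by_cases hl : acc.getLast? = some '_'
        · rw [show pvStepB acc c = acc from by simp [pvStepB, ← hc', hu, hl]]
          rw [ih acc]
          simp [pvSq, hu, hl]
        · rw [show pvStepB acc c = acc ++ [c'] from by simp [pvStepB, ← hc', hu, hl]]
          rw [ih (acc ++ [c'])]
          simp [pvSq, hu, hl]
      · rw [show pvStepB acc c = acc ++ [c'] from by simp [pvStepB, ← hc', hu]]
        rw [ih (acc ++ [c'])]
        simp [pvSq, hu]

theorem pvDict_subsumed (u : String) (v : String)
    (h : RISK_KATEGORISI_ESLEMESI.get? u = some v) :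
    (match pvSecB u pvTabloB with | some e => e | none => "") = v := by
  by_cases h0 : u = "dusuk"
  · subst h0
    rw [show RISK_KATEGORISI_ESLEMESI.get? "dusuk" = some "dusuk" from by decide] at h
    cases h
    decide
  by_cases h1 : u = "low"
  · subst h1
    rw [show RISK_KATEGORISI_ESLEMESI.get? "low" = some "dusuk" from by decide] at h
    cases h
    decide
  by_cases h2 : u = "cok_dusuk"
  · subst h2
    rw [show RISK_KATEGORISI_ESLEMESI.get? "cok_dusuk" = some "dusuk" from by decide] at h
    cases h
    decide
  by_cases h3 : u = "cokdusuk"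
  · subst h3
    rw [show RISK_KATEGORISI_ESLEMESI.get? "cokdusuk" = some "dusuk" from by decide] at h
    cases h
    decide
  by_cases h4 : u = "very_low"
  · subst h4
    rw [show RISK_KATEGORISI_ESLEMESI.get? "very_low" = some "dusuk" from by decide] at h
    cases h
    decide
  by_cases h5 : u = "orta"
  · subst h5
    rw [show RISK_KATEGORISI_ESLEMESI.get? "orta" = some "orta" from by decide] at h
    cases h
    decide
  by_cases h6 : u = "medium"
  · subst h6
    rw [show RISK_KATEGORISI_ESLEMESI.get? "medium" = some "orta" from by decide] at h
    cases h
    decide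
  by_cases h7 : u = "mid"
  · subst h7
    rw [show RISK_KATEGORISI_ESLEMESI.get? "mid" = some "orta" from by decide] at h
    cases h
    decide
  by_cases h8 : u = "orta_risk"
  · subst h8
    rw [show RISK_KATEGORISI_ESLEMESI.get? "orta_risk" = some "orta" from by decide] at h
    cases h
    decide
  by_cases h9 : u = "yuksek"
  · subst h9
    rw [show RISK_KATEGORISI_ESLEMESI.get? "yuksek" = some "yuksek" from by decide] at h
    cases h
    decide
  by_cases h10 : u = "high"
  · subst h10
    rw [show RISK_KATEGORISI_ESLEMESI.get? "high" = some "yuksek" from by decide] at h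
    cases h
    decide
  by_cases h11 : u = "cok_yuksek"
  · subst h11
    rw [show RISK_KATEGORISI_ESLEMESI.get? "cok_yuksek" = some "yuksek" from by decide] at h
    cases h
    decide
  by_cases h12 : u = "cokyuksek"
  · subst h12
    rw [show RISK_KATEGORISI_ESLEMESI.get? "cokyuksek" = some "yuksek" from by decide] at h
    cases h
    decide
  by_cases h13 : u = "very_high"
  · subst h13
    rw [show RISK_KATEGORISI_ESLEMESI.get? "very_high" = some "yuksek" from by decide] at h
    cases h
    decide
  exfalso
  have hk : u ∉ RISK_KATEGORISI_ESLEMESI.keys := by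
    rw [show RISK_KATEGORISI_ESLEMESI.keys = (["dusuk", "low", "cok_dusuk", "cokdusuk", "very_low", "orta", "medium", "mid", "orta_risk", "yuksek", "high", "cok_yuksek", "cokyuksek", "very_high"] : List String) from by decide]
    simp only [List.mem_cons, List.not_mem_nil, or_false]
    tauto
  rw [(PySem.Dict.get?_eq_none_iff_not_mem_keys _ _).mpr hk] at h
  cases h

theorem pvMapMap (t : List Char) :
    (PySem.Str.replace (PySem.Str.replace (String.ofList t) "-" "_") " " "_").toList
      = t.map (fun c => if c = '-' ∨ c = ' ' then '_' else c) := by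
  rw [PySem.Str.replace, PySem.Str.replace]
  simp only [String.toList_ofList]
  rw [show ("-" : String).toList = ['-'] from rfl, show (" " : String).toList = [' '] from rfl,
    show ("_" : String).toList = ['_'] from rfl]
  rw [pvReplace_single, pvReplace_single, List.map_map]
  apply List.map_congr_left
  intro c _
  by_cases h1 : c = '-' <;> by_cases h2 : c = ' ' <;> simp [h1, h2, Function.comp]

theorem pvDecide_eq (u : String) :
    (match RISK_KATEGORISI_ESLEMESI.get? u with
     | some v => v
     | none =>
        if PySem.Str.isIn "dusuk" u || PySem.Str.isIn "low" u then "dusuk"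
        else if PySem.Str.isIn "yuksek" u || PySem.Str.isIn "high" u then "yuksek"
        else if PySem.Str.isIn "orta" u || PySem.Str.isIn "medium" u || PySem.Str.isIn "mid" u then "orta"
        else "")
      = (match pvSecB u pvTabloB with | some etiket => etiket | none => "") := by
  cases hg : RISK_KATEGORISI_ESLEMESI.get? u with
  | some v => exact (pvDict_subsumed u v hg).symm
  | none =>
      simp only [pvSecB, pvTabloB, List.any_cons, List.any_nil, Bool.or_false]
      split_ifs <;> first | rfl | (exfalso; simp_all [Bool.or_assoc])

-- ===== VERDICT (by name: the statement is the Claim_ definition above) =====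
set_option maxHeartbeats 1000000 in
theorem risk_kategorisini_normalize_et_spec : Claim_equal_risk_kategorisini_normalize_et := by
  intro s _ _
  unfold Spec_risk_kategorisini_normalize_et
  unfold risk_kategorisini_normalize_et risk_kategorisini_normalize_et_alt
  simp only []
  set t : List Char := (PySem.Str.lower (PySem.Str.strip s)).toList.map pvTrChar with ht
  set g : Char → Char := fun c => if c = '-' ∨ c = ' ' then '_' else c with hg
  -- the two normalizations agree
  have hB : (String.ofList t).toList.foldl pvStepB [] = pvSq false (t.map g) := by
    rw [String.toList_ofList, pvFoldl_stepB t []]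
    simp only [List.getLast?_nil, List.nil_append]
    rw [← hg]
    simp
  have hA : (pvCollapseA (PySem.Str.replace (PySem.Str.replace (String.ofList t) "-" "_") " " "_").toList.length
        (PySem.Str.replace (PySem.Str.replace (String.ofList t) "-" "_") " " "_")).toList
      = pvSq false (t.map g) := by
    have h1 := pvMapMap t
    rw [show PySem.Str.replace (PySem.Str.replace (String.ofList t) "-" "_") " " "_"
          = String.ofList (t.map g) from by
        rw [← String.ofList_toList (s := PySem.Str.replace (PySem.Str.replace (String.ofList t) "-" "_") " " "_"), h1]]
    rw [String.toList_ofList]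
    exact pvCollapseA_eq_sq (t.map g).length (t.map g) le_rfl
  have hu : pvCollapseA (PySem.Str.replace (PySem.Str.replace (String.ofList t) "-" "_") " " "_").toList.length
        (PySem.Str.replace (PySem.Str.replace (String.ofList t) "-" "_") " " "_")
      = String.ofList ((String.ofList t).toList.foldl pvStepB []) := by
    rw [hB, ← hA, String.ofList_toList]
  rw [hu]
  generalize (String.ofList (List.foldl pvStepB [] (String.ofList t).toList)) = u
  exact pvDecide_eq u
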